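-- pv_equiv track=rewrite | github.com/DreyAnd/WP-Rest-Enum | wp-rest-enum.py | fill_id
-- ===== SOURCE A (Python) =====
-- def fill_id(route):
--     route = route.split("/")
--     c = 0
--     for part in route:
--         if "(?P" in part:
--             route[c] = "123"
--         c += 1
--
--     route = "/".join(route)
--     return route
-- ===== SOURCE B (Python) =====
-- def fill_id(route):
--     out = []
--     seg = []
--     has = False
--     for ch in route:
--         if ch == '/':
--             out.append('123' if has else ''.join(seg))
--             out.append('/')
--             seg = []
--             has = False
--         else:
--             if ch == 'P' and seg[-2:] == ['(', '?']:
--                 has = True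
--             seg.append(ch)
--     out.append('123' if has else ''.join(seg))
--     return ''.join(out)
-- ===== Notes on version B (the rewrite author's own statement) =====
-- stated objective: alternative
-- what changed: Replaces the split('/')/indexed-loop/join('/') pipeline with a single character-by-character scan that emits segments as it meets '/' and detects the '(?P' marker incrementally from the last two buffered characters.
import Mathlib
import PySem

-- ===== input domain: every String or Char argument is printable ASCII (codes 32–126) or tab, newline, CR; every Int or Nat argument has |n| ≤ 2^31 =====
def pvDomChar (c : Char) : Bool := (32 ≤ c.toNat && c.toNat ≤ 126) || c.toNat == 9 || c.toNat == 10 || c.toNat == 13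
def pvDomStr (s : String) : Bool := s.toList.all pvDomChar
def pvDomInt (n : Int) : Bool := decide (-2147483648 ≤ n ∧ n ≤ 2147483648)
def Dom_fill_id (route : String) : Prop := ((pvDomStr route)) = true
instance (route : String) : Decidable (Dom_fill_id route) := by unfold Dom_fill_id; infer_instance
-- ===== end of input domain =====

-- B replaces A's split('/')/indexed-loop/join('/') pipeline with a single left-to-right
-- character scan that emits segments at each '/' and detects '(?P' incrementally (alternative, same O(n) cost).


-- ===== PORT A =====
-- route.split("/") with the non-empty literal separator is PySem.Chars.splitOn on the code points;
-- the for-loop with counter c mutating route[c] is a foldl carrying (list, c).  (Python iterates the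
-- mutated list, but each mutation is at the index just yielded, so the iteration sees the original parts.)
def fill_id (route : String) : String :=
  let parts : List String := (PySem.Chars.splitOn route.toList "/".toList).map String.ofList
  let res := parts.foldl (fun (st : List String × Nat) part =>
      let st' := if PySem.Str.isIn "(?P" part then (st.1.set st.2 "123", st.2) else st
      (st'.1, st'.2 + 1)) (parts, 0)
  PySem.Str.join "/" res.1

-- ===== PORT B =====
-- Source B's scan: out = emitted pieces, seg = chars of the current segment, has = "'(?P' seen in seg";
-- seg[-2:] is PySem.List.slice seg (-2) none.
def fillScan : List Char → List String → List Char → Bool → String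
  | [], out, seg, has =>
      PySem.Str.join "" (out ++ [if has then "123" else String.ofList seg])
  | ch :: rest, out, seg, has =>
      if ch = '/' then
        fillScan rest (out ++ [if has then "123" else String.ofList seg, "/"]) [] false
      else
        let has' := if ch = 'P' ∧ PySem.List.slice seg (some (-2)) none = ['(', '?'] then true else has
        fillScan rest out (seg ++ [ch]) has'

def fill_id_alt (route : String) : String := fillScan route.toList [] [] false

-- ===== PRECONDITION & SPEC =====
def Spec_fill_id (route : String) (out : String) : Prop := out = fill_id_alt route
instance (route : String) (out : String) : Decidable (Spec_fill_id route out) := by unfold Spec_fill_id; infer_instance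

-- ===== CLAIM (what is proved, stated in full; the proofs are below) =====
def Claim_equal_fill_id : Prop := ∀ (route : String), Dom_fill_id route → Spec_fill_id route (fill_id route)

-- ===== LEMMAS AND PROOFS =====

-- reference shape of a '/'-split, convenient for induction on characters
def spl : List Char → List (List Char)
  | [] => [[]]
  | c :: cs => if c = '/' then [] :: spl cs else (spl cs).modifyHead (c :: ·)

def procSeg (p : List Char) : List Char :=
  if PySem.Chars.isIn ['(', '?', 'P'] p then ['1', '2', '3'] else p

theorem spl_ne_nil (l : List Char) : spl l ≠ [] := by
  cases l with
  | nil => simp [spl]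
  | cons c cs =>
    simp only [spl]
    split
    · simp
    · cases h : spl cs with
      | nil => exact absurd h (spl_ne_nil cs)
      | cons p ps => simp

theorem modifyHead_fun_id {α : Type} (l : List α) : l.modifyHead (fun x => x) = l := by
  cases l <;> rfl

theorem go_eq (fuel : Nat) (l cur : List Char) (acc : List (List Char)) (h : l.length ≤ fuel) :
    PySem.Chars.splitOn.go ['/'] fuel l cur acc = acc.reverse ++ (spl l).modifyHead (cur.reverse ++ ·) := by
  induction fuel generalizing l cur acc with
  | zero =>
    have : l = [] := List.eq_nil_of_length_eq_zero (Nat.le_zero.mp h)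
    subst this
    simp [PySem.Chars.splitOn.go, spl]
  | succ fuel ih =>
    cases l with
    | nil => simp [PySem.Chars.splitOn.go, spl]
    | cons c rest =>
      by_cases hc : c = '/'
      · subst hc
        rw [show PySem.Chars.splitOn.go ['/'] (fuel + 1) ('/' :: rest) cur acc
              = PySem.Chars.splitOn.go ['/'] fuel rest [] (cur.reverse :: acc) by
            simp [PySem.Chars.splitOn.go]]
        rw [ih rest [] (cur.reverse :: acc) (by simpa using Nat.le_of_succ_le_succ h)]
        simp [spl, modifyHead_fun_id]
      · rw [show PySem.Chars.splitOn.go ['/'] (fuel + 1) (c :: rest) cur acc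
              = PySem.Chars.splitOn.go ['/'] fuel rest (c :: cur) acc by
            simp [PySem.Chars.splitOn.go, List.isPrefixOf, Ne.symm hc]]
        rw [ih rest (c :: cur) acc (by simpa using Nat.le_of_succ_le_succ h)]
        obtain ⟨p, ps, hp⟩ : ∃ p ps, spl rest = p :: ps := by
          cases hsp : spl rest with
          | nil => exact absurd hsp (spl_ne_nil rest)
          | cons p ps => exact ⟨p, ps, rfl⟩
        simp [spl, hc, hp]

theorem splitOn_eq_spl (l : List Char) : PySem.Chars.splitOn l ['/'] = spl l := by
  have := go_eq (l.length + 1) l [] [] (Nat.le_succ _)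
  simpa [PySem.Chars.splitOn, modifyHead_fun_id] using this

-- the join with empty separator is flatten
theorem join_nil_flatten (xs : List (List Char)) : PySem.Chars.join [] xs = xs.flatten := by
  induction xs with
  | nil => simp [PySem.Chars.join, List.intercalate]
  | cons h t ih =>
    cases t <;> simp_all [PySem.Chars.join, List.intercalate, List.intersperse]

-- A's indexed-set loop is a map
def replPart (part : String) : String := if PySem.Str.isIn "(?P" part then "123" else part

theorem A_loop (todo done : List String) :
    todo.foldl (fun (st : List String × Nat) part =>
        let st' := if PySem.Str.isIn "(?P" part then (st.1.set st.2 "123", st.2) else st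
        (st'.1, st'.2 + 1)) (done ++ todo, done.length)
      = (done ++ todo.map replPart, done.length + todo.length) := by
  induction todo generalizing done with
  | nil => simp
  | cons part rest ih =>
    simp only [List.foldl_cons, List.map_cons, List.length_cons]
    have h2 := ih (done ++ [replPart part])
    simp only [List.append_assoc, List.singleton_append, List.length_append, List.length_cons,
      List.length_nil, Nat.zero_add] at h2
    by_cases hc : PySem.Str.isIn "(?P" part = true
    · have hr : replPart part = "123" := by unfold replPart; rw [if_pos hc]
      have hset : (done ++ part :: rest).set done.length "123" = done ++ "123" :: rest := by simp
      rw [if_pos hc]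
      simp only [hset]
      rw [hr] at h2
      rw [h2]
      simp only [Prod.mk.injEq]
      exact ⟨by rw [hr], by omega⟩
    · have hr : replPart part = part := by unfold replPart; rw [if_neg hc]
      rw [if_neg hc]
      rw [hr] at h2
      rw [h2]
      simp only [Prod.mk.injEq]
      exact ⟨by rw [hr], by omega⟩

theorem fill_id_map (route : String) :
    fill_id route = PySem.Str.join "/"
      (((spl route.toList).map String.ofList).map replPart) := by
  have h := A_loop ((spl route.toList).map String.ofList) []
  simp only [List.nil_append, List.length_nil, Nat.zero_add] at h
  simp only [fill_id]
  rw [show "/".toList = ['/'] from by decide]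
  rw [splitOn_eq_spl, h]

-- incremental '(?P' detection is exact
theorem infix_concat_iff (pat xs : List Char) (c : Char) :
    pat <:+: (xs ++ [c]) ↔ pat <:+ (xs ++ [c]) ∨ pat <:+: xs := by
  have h2 : (xs ++ [c]).reverse = c :: xs.reverse := by simp
  have h3 : pat.reverse <+: (c :: xs.reverse) ↔ pat <:+ (xs ++ [c]) := by
    rw [← h2]; exact List.reverse_prefix
  rw [← List.reverse_infix, h2, List.infix_cons_iff, h3, List.reverse_infix]

theorem pat_suffix_concat (seg : List Char) (ch : Char) :
    (['(', '?', 'P'] <:+ (seg ++ [ch])) ↔ ch = 'P' ∧ ['(', '?'] <:+ seg := by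
  rw [← List.reverse_prefix, ← List.reverse_prefix (l₁ := ['(', '?'])]
  rw [show (seg ++ [ch]).reverse = ch :: seg.reverse from by simp,
    show (['(', '?', 'P'] : List Char).reverse = 'P' :: ['?', '('] from by decide,
    show (['(', '?'] : List Char).reverse = ['?', '('] from by decide,
    List.cons_prefix_cons]
  tauto

theorem has_step (seg : List Char) (ch : Char) :
    (if ch = 'P' ∧ PySem.List.slice seg (some (-2)) none = ['(', '?'] then true
     else PySem.Chars.isIn ['(', '?', 'P'] seg)
    = PySem.Chars.isIn ['(', '?', 'P'] (seg ++ [ch]) := by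
  have hslice : PySem.List.slice seg (some (-2)) none = seg.drop (seg.length - 2) := by
    simp [PySem.List.slice]
  have hsuf : (seg.drop (seg.length - 2) = ['(', '?']) ↔ ['(', '?'] <:+ seg := by
    constructor
    · intro h; exact h ▸ List.drop_suffix _ _
    · intro h
      obtain ⟨t, ht⟩ := h
      subst ht; simp
  by_cases hc : ch = 'P' ∧ PySem.List.slice seg (some (-2)) none = ['(', '?']
  · rw [if_pos hc]
    symm
    rw [PySem.Chars.isIn_iff_infix, infix_concat_iff, pat_suffix_concat]
    exact Or.inl ⟨hc.1, hsuf.mp (hslice ▸ hc.2)⟩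
  · rw [if_neg hc]
    rw [hslice, hsuf] at hc
    by_cases hI : PySem.Chars.isIn ['(', '?', 'P'] seg = true
    · rw [hI]
      symm
      rw [PySem.Chars.isIn_iff_infix] at hI ⊢
      rw [infix_concat_iff]
      exact Or.inr hI
    · rw [Bool.not_eq_true] at hI
      rw [hI]
      symm
      rw [PySem.Chars.isIn_eq_false_iff] at hI ⊢
      rw [infix_concat_iff, pat_suffix_concat]
      tauto

theorem spl_no_slash (s : List Char) (h : '/' ∉ s) : spl s = [s] := by
  induction s with
  | nil => rfl
  | cons c cs ih =>
    have hc : c ≠ '/' := fun hcc => h (hcc ▸ List.mem_cons_self)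
    have := ih (fun hm => h (List.mem_cons_of_mem _ hm))
    simp [spl, hc, this]

theorem spl_append_left (s l : List Char) (h : '/' ∉ s) :
    spl (s ++ l) = (spl l).modifyHead (s ++ ·) := by
  induction s with
  | nil =>
    obtain ⟨p, ps, hp⟩ : ∃ p ps, spl l = p :: ps := by
      cases hsp : spl l with
      | nil => exact absurd hsp (spl_ne_nil l)
      | cons p ps => exact ⟨p, ps, rfl⟩
    simp [hp]
  | cons c cs ih =>
    have hc : c ≠ '/' := fun hcc => h (hcc ▸ List.mem_cons_self)
    have hrec := ih (fun hm => h (List.mem_cons_of_mem _ hm))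
    obtain ⟨p, ps, hp⟩ : ∃ p ps, spl l = p :: ps := by
      cases hsp : spl l with
      | nil => exact absurd hsp (spl_ne_nil l)
      | cons p ps => exact ⟨p, ps, rfl⟩
    simp only [List.cons_append, spl, hc, hrec, hp]
    simp

-- B's scan computes the piecewise result
theorem B_loop (l : List Char) (out : List String) (seg : List Char) (hseg : '/' ∉ seg) :
    fillScan l out seg (PySem.Chars.isIn ['(', '?', 'P'] seg)
    = String.ofList ((out.map String.toList).flatten
        ++ PySem.Chars.join ['/'] ((spl (seg ++ l)).map procSeg)) := by
  induction l generalizing out seg with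
  | nil =>
    rw [List.append_nil, spl_no_slash seg hseg]
    simp only [fillScan, PySem.Str.join]
    rw [show "".toList = ([] : List Char) from by decide, join_nil_flatten]
    congr 1
    simp only [List.map_append, List.flatten_append, List.map_cons, List.map_nil]
    congr 1
    by_cases hc : PySem.Chars.isIn ['(', '?', 'P'] seg
    · simp [hc, procSeg, PySem.Chars.join, List.intercalate]
    · simp only [Bool.not_eq_true] at hc
      simp [hc, procSeg, PySem.Chars.join, List.intercalate]
  | cons ch rest ih =>
    by_cases hch : ch = '/'
    · subst hch
      rw [show fillScan ('/' :: rest) out seg (PySem.Chars.isIn ['(', '?', 'P'] seg)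
            = fillScan rest (out ++ [if PySem.Chars.isIn ['(', '?', 'P'] seg then "123"
                else String.ofList seg, "/"]) [] false from by simp [fillScan]]
      rw [show (false : Bool) = PySem.Chars.isIn ['(', '?', 'P'] ([] : List Char) from rfl]
      rw [ih _ [] (by simp)]
      rw [spl_append_left seg _ hseg]
      rw [show spl ('/' :: rest) = [] :: spl rest from by simp [spl]]
      obtain ⟨p, ps, hp⟩ : ∃ p ps, spl rest = p :: ps := by
        cases hsp : spl rest with
        | nil => exact absurd hsp (spl_ne_nil rest)
        | cons p ps => exact ⟨p, ps, rfl⟩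
      rw [hp]
      simp only [List.modifyHead, List.map_cons, List.nil_append, List.append_nil]
      rw [show PySem.Chars.join ['/'] (procSeg seg :: procSeg p :: (ps.map procSeg))
            = procSeg seg ++ ['/'] ++ PySem.Chars.join ['/'] (procSeg p :: ps.map procSeg) from by
          simp [PySem.Chars.join, List.intercalate]]
      congr 1
      simp only [List.map_append, List.flatten_append, List.map_cons, List.map_nil, hp,
        List.append_assoc]
      by_cases hc : PySem.Chars.isIn ['(', '?', 'P'] seg = true
      · simp [hc, procSeg]
      · rw [Bool.not_eq_true] at hc
        simp [hc, procSeg]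
    · rw [show fillScan (ch :: rest) out seg (PySem.Chars.isIn ['(', '?', 'P'] seg)
            = fillScan rest out (seg ++ [ch])
                (if ch = 'P' ∧ PySem.List.slice seg (some (-2)) none = ['(', '?'] then true
                 else PySem.Chars.isIn ['(', '?', 'P'] seg) from by simp [fillScan, hch]]
      rw [has_step]
      rw [ih out (seg ++ [ch]) (by simp [hseg, Ne.symm hch])]
      simp [List.append_assoc]

theorem toList_repl (p : List Char) : (replPart (String.ofList p)).toList = procSeg p := by
  unfold replPart procSeg
  rw [show PySem.Str.isIn "(?P" (String.ofList p)
        = PySem.Chars.isIn ['(', '?', 'P'] p from by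
      simp [PySem.Str.isIn]]
  by_cases hc : PySem.Chars.isIn ['(', '?', 'P'] p
  · simp [hc]
  · simp only [Bool.not_eq_true] at hc
    simp [hc]

-- ===== VERDICT (by name: the statement is the Claim_ definition above) =====
theorem fill_id_spec : Claim_equal_fill_id := by
  unfold Claim_equal_fill_id
  intro route _
  unfold Spec_fill_id
  rw [fill_id_map]
  unfold fill_id_alt
  rw [show (false : Bool) = PySem.Chars.isIn ['(', '?', 'P'] ([] : List Char) from rfl]
  rw [B_loop route.toList [] [] (by simp)]
  simp only [List.map_nil, List.flatten_nil, List.nil_append, PySem.Str.join]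
  rw [show "/".toList = ['/'] from by decide]
  congr 1
  rw [List.map_map, List.map_map]
  exact congrArg (PySem.Chars.join ['/']) (List.map_congr_left fun p _ => toList_repl p)
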